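-- pv_equiv track=rewrite | github.com/tabish3210/unstop_problems_DSA | Golden Value.py | calculateGoldenValue
-- ===== SOURCE A (Python) =====
-- def calculateGoldenValue(N, Arr):
--     # To store the cumulative XOR up to each index
--     xor_cumulative = [0] * (N + 1)
--
--     # Calculate cumulative XORs
--     for i in range(1, N + 1):
--         xor_cumulative[i] = xor_cumulative[i - 1] ^ Arr[i - 1]
--
--     # To track the sum of XORs of even-length subarrays and odd-length subarrays
--     SE = 0  # Sum of XORs for even-length subarrays
--     SO = 0  # Sum of XORs for odd-length subarrays
--
--     # Loop through the array and calculate the XOR sums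
--     for i in range(N):
--         # If i is the start of a subarray
--         for j in range(i + 1, N + 1):
--             subarray_xor = xor_cumulative[j] ^ xor_cumulative[i]
--             length = j - i
--
--             if length % 2 == 0:
--                 SE += subarray_xor  # Even-length subarrays
--             else:
--                 SO += subarray_xor  # Odd-length subarrays
--
--     # The golden value is the absolute difference
--     return abs(SE - SO)
-- ===== SOURCE B (Python) =====
-- def calculateGoldenValue(N, Arr):
--     # Stream over subarray start points, maintaining a running XOR and an
--     # alternating sign, accumulating SE - SO directly in one scalar --
--     # no prefix-XOR table and no separate even/odd accumulators.
--     diff = 0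
--     for i in range(N):
--         cur = 0
--         sign = -1  # first subarray [i..i] has odd length
--         for j in range(i, N):
--             cur ^= Arr[j]
--             diff += sign * cur
--             sign = -sign
--     return abs(diff)
-- ===== Notes on version B (the rewrite author's own statement) =====
-- stated objective: alternative
-- what changed: Replaces the precomputed prefix-XOR table and the two even/odd accumulators SE/SO by a single streaming pass per start index that maintains a running XOR of the current subarray and an alternating sign, accumulating SE-SO directly in one scalar.
import Mathlib
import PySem

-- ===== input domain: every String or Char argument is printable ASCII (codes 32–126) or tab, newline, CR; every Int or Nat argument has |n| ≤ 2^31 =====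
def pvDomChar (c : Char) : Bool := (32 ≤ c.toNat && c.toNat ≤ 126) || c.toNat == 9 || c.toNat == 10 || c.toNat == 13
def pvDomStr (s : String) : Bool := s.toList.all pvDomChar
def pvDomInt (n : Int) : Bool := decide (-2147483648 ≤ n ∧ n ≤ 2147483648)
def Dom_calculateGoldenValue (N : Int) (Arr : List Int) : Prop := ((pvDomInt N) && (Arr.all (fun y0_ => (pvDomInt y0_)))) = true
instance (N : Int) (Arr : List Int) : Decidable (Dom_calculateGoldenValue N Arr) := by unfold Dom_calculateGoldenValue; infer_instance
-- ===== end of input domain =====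

-- B replaces A's prefix-XOR table and separate even/odd accumulators by one streaming
-- pass per start index with a running XOR and an alternating sign (alternative
-- decomposition, same O(N^2) cost).

-- ===== PORT A =====
def calculateGoldenValue (N : Int) (Arr : List Int) : Int :=
  let xc0 : List Int := List.replicate (N + 1).toNat 0
  let xc : List Int :=
    (PySem.List.pyRange 1 (N + 1)).foldl
      (fun xc i =>
        xc.set i.toNat
          (PySem.Int.bxor (PySem.List.pyGetD xc (i - 1) 0) (PySem.List.pyGetD Arr (i - 1) 0)))
      xc0
  let p : Int × Int :=
    (PySem.List.pyRange 0 N).foldl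
      (fun (p : Int × Int) i =>
        (PySem.List.pyRange (i + 1) (N + 1)).foldl
          (fun (q : Int × Int) j =>
            let subarray_xor := PySem.Int.bxor (PySem.List.pyGetD xc j 0) (PySem.List.pyGetD xc i 0)
            let length := j - i
            if PySem.Int.mod length 2 = 0 then (q.1 + subarray_xor, q.2)
            else (q.1, q.2 + subarray_xor))
          p)
      (0, 0)
  |p.1 - p.2|

-- ===== PORT B =====
def calculateGoldenValue_alt (N : Int) (Arr : List Int) : Int :=
  let diff : Int :=
    (PySem.List.pyRange 0 N).foldl
      (fun diff i =>
        ((PySem.List.pyRange i N).foldl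
          (fun (s : Int × Int × Int) j =>
            let cur := PySem.Int.bxor s.2.1 (PySem.List.pyGetD Arr j 0)
            (s.1 + s.2.2 * cur, cur, -s.2.2))
          (diff, 0, -1)).1)
      0
  |diff|

-- ===== PRECONDITION & SPEC =====
-- Python A raises IndexError (Arr[i-1]) exactly when N > len(Arr); B raises there too.
def Pre_calculateGoldenValue (N : Int) (Arr : List Int) : Prop := N ≤ (Arr.length : Int)
instance (N : Int) (Arr : List Int) : Decidable (Pre_calculateGoldenValue N Arr) := by
  unfold Pre_calculateGoldenValue; infer_instance

def pvWitness_calculateGoldenValue : Int × List Int := (3, [5, -2, 7])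

def Spec_calculateGoldenValue (N : Int) (Arr : List Int) (out : Int) : Prop := out = calculateGoldenValue_alt N Arr
instance (N : Int) (Arr : List Int) (out : Int) : Decidable (Spec_calculateGoldenValue N Arr out) := by unfold Spec_calculateGoldenValue; infer_instance

-- ===== CLAIM (what is proved, stated in full; the proofs are below) =====
def Claim_equal_calculateGoldenValue : Prop := ∀ (N : Int) (Arr : List Int), Dom_calculateGoldenValue N Arr → Pre_calculateGoldenValue N Arr → Spec_calculateGoldenValue N Arr (calculateGoldenValue N Arr)

-- ===== LEMMAS AND PROOFS =====

-- prefix XOR of the first k entries of Arr (missing entries read as 0)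
def pvPref (Arr : List Int) : Nat → Int
  | 0 => 0
  | k + 1 => PySem.Int.bxor (pvPref Arr k) (Arr.getD k 0)

-- XOR of the subarray Arr[i..m-1]
def pvTerm (Arr : List Int) (i m : Nat) : Int := PySem.Int.bxor (pvPref Arr m) (pvPref Arr i)

-- sum of XORs of the even-length subarrays starting at i with length ≤ c
def pvSE (Arr : List Int) (i : Nat) : Nat → Int
  | 0 => 0
  | c + 1 => pvSE Arr i c + (if (c + 1) % 2 = 0 then pvTerm Arr i (i + c + 1) else 0)

-- sum of XORs of the odd-length subarrays starting at i with length ≤ c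
def pvSO (Arr : List Int) (i : Nat) : Nat → Int
  | 0 => 0
  | c + 1 => pvSO Arr i c + (if (c + 1) % 2 = 0 then 0 else pvTerm Arr i (i + c + 1))

-- sign-case evaluations of PySem.Int.bxor (the nonneg/nonneg case is PySem.Int.bxor_natCast)
lemma pv_bxor_np (m n : Nat) : PySem.Int.bxor (m : Int) (-(n : Int) - 1) = -((m ^^^ n : Nat) : Int) - 1 := by
  have h1 : (0 : Int) ≤ (m : Int) := Int.natCast_nonneg m
  have h2 : ¬ (0 : Int) ≤ -(n : Int) - 1 := by omega
  unfold PySem.Int.bxor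
  rw [if_pos h1, if_neg h2, show (-(-(n : Int) - 1) - 1) = ((n : Int)) from by ring]
  simp

lemma pv_bxor_pn (m n : Nat) : PySem.Int.bxor (-(m : Int) - 1) (n : Int) = -((m ^^^ n : Nat) : Int) - 1 := by
  have h1 : ¬ (0 : Int) ≤ -(m : Int) - 1 := by omega
  have h2 : (0 : Int) ≤ (n : Int) := Int.natCast_nonneg n
  unfold PySem.Int.bxor
  rw [if_neg h1, if_pos h2, show (-(-(m : Int) - 1) - 1) = ((m : Int)) from by ring]
  simp

lemma pv_bxor_pp (m n : Nat) : PySem.Int.bxor (-(m : Int) - 1) (-(n : Int) - 1) = ((m ^^^ n : Nat) : Int) := by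
  have h1 : ¬ (0 : Int) ≤ -(m : Int) - 1 := by omega
  have h2 : ¬ (0 : Int) ≤ -(n : Int) - 1 := by omega
  unfold PySem.Int.bxor
  rw [if_neg h1, if_neg h2, show (-(-(m : Int) - 1) - 1) = ((m : Int)) from by ring,
    show (-(-(n : Int) - 1) - 1) = ((n : Int)) from by ring]
  simp

lemma pv_repr (a : Int) : (∃ m : Nat, a = (m : Int)) ∨ (∃ m : Nat, a = -(m : Int) - 1) := by
  by_cases h : 0 ≤ a
  · exact Or.inl ⟨a.toNat, by omega⟩
  · exact Or.inr ⟨(-a - 1).toNat, by omega⟩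

lemma pv_bxor_assoc (a b c : Int) :
    PySem.Int.bxor (PySem.Int.bxor a b) c = PySem.Int.bxor a (PySem.Int.bxor b c) := by
  rcases pv_repr a with ⟨x, rfl⟩ | ⟨x, rfl⟩ <;>
    rcases pv_repr b with ⟨y, rfl⟩ | ⟨y, rfl⟩ <;>
      rcases pv_repr c with ⟨z, rfl⟩ | ⟨z, rfl⟩ <;>
        simp [PySem.Int.bxor_natCast, pv_bxor_np, pv_bxor_pn, pv_bxor_pp, Nat.xor_assoc]

lemma pv_bxor_right_swap (a b c : Int) :
    PySem.Int.bxor (PySem.Int.bxor a b) c = PySem.Int.bxor (PySem.Int.bxor a c) b := by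
  rw [pv_bxor_assoc, pv_bxor_assoc, PySem.Int.bxor_comm b c]

lemma pv_sum_map_sub {α : Type} (l : List α) (f g : α → Int) :
    (l.map (fun x => f x - g x)).sum = (l.map f).sum - (l.map g).sum := by
  induction l with
  | nil => simp
  | cons a t ih => simp [ih]; ring

-- the cumulative-XOR table built by A's first loop holds the prefix XORs
lemma pvXc_spec (Arr : List Int) (n : Nat) : ∀ m : Nat, m ≤ n →
    (((PySem.List.pyRange 1 ((m : Int) + 1)).foldl
        (fun xc i =>
          xc.set i.toNat
            (PySem.Int.bxor (PySem.List.pyGetD xc (i - 1) 0) (PySem.List.pyGetD Arr (i - 1) 0)))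
        (List.replicate (((n : Int) + 1).toNat) (0 : Int))).length = n + 1) ∧
    (∀ k : Nat, k ≤ m →
      ((PySem.List.pyRange 1 ((m : Int) + 1)).foldl
        (fun xc i =>
          xc.set i.toNat
            (PySem.Int.bxor (PySem.List.pyGetD xc (i - 1) 0) (PySem.List.pyGetD Arr (i - 1) 0)))
        (List.replicate (((n : Int) + 1).toNat) (0 : Int))).getD k 0 = pvPref Arr k) := by
  have hrep : ((n : Int) + 1).toNat = n + 1 := by omega
  simp only [hrep]
  intro m
  induction m with
  | zero =>
    intro _
    constructor
    · simp
    · intro k hk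
      interval_cases k
      simp [pvPref]
  | succ m ih =>
    intro hm
    obtain ⟨ihlen, ihval⟩ := ih (by omega)
    have hsplit : PySem.List.pyRange 1 (((m + 1 : Nat) : Int) + 1)
        = PySem.List.pyRange 1 ((m : Int) + 1) ++ [(m : Int) + 1] := by
      have : (((m + 1 : Nat) : Int) + 1) = ((m : Int) + 1) + 1 := by push_cast; ring
      rw [this, PySem.List.pyRange_one_succ_right (by omega)]
    rw [hsplit, List.foldl_append]
    simp only [List.foldl_cons, List.foldl_nil]
    have htn : ((m : Int) + 1).toNat = m + 1 := by omega
    have hsub : ((m : Int) + 1 - 1) = ((m : Nat) : Int) := by ring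
    rw [htn, hsub, PySem.List.pyGetD_natCast, PySem.List.pyGetD_natCast, ihval m le_rfl]
    constructor
    · simp [ihlen]
    · intro k hk
      rcases Nat.eq_or_lt_of_le hk with hk1 | hk2
      · subst hk1
        simp [List.getD_eq_getElem?_getD, ihlen, pvPref, (by omega : m + 1 < n + 1)]
      · have hne : ¬ (m + 1 = k) := by omega
        simp only [List.getD_eq_getElem?_getD, List.getElem?_set, hne, if_false]
        rw [← List.getD_eq_getElem?_getD]
        exact ihval k (by omega)

-- A's inner loop (lookups already replaced by prefix XORs) accumulates pvSE/pvSO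
lemma pvA_inner (Arr : List Int) (i : Nat) :
    ∀ (c : Nat) (q : Int × Int),
      (PySem.List.pyRange ((i : Int) + 1) ((i : Int) + 1 + (c : Int))).foldl
        (fun (q : Int × Int) j =>
          if PySem.Int.mod (j - (i : Int)) 2 = 0 then
            (q.1 + PySem.Int.bxor (pvPref Arr j.toNat) (pvPref Arr i), q.2)
          else (q.1, q.2 + PySem.Int.bxor (pvPref Arr j.toNat) (pvPref Arr i))) q
      = (q.1 + pvSE Arr i c, q.2 + pvSO Arr i c) := by
  intro c
  induction c with
  | zero =>
    intro q
    simp [pvSE, pvSO]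
  | succ c ih =>
    intro q
    have hsplit : PySem.List.pyRange ((i : Int) + 1) ((i : Int) + 1 + ((c + 1 : Nat) : Int))
        = PySem.List.pyRange ((i : Int) + 1) ((i : Int) + 1 + (c : Int)) ++ [(i : Int) + 1 + (c : Int)] := by
      have : ((i : Int) + 1 + ((c + 1 : Nat) : Int)) = ((i : Int) + 1 + (c : Int)) + 1 := by
        push_cast; ring
      rw [this, PySem.List.pyRange_one_succ_right (by omega)]
    rw [hsplit, List.foldl_append, ih]
    simp only [List.foldl_cons, List.foldl_nil]
    have h1 : ((i : Int) + 1 + (c : Int)) - (i : Int) = ((c + 1 : Nat) : Int) := by push_cast; ring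
    have h2 : ((i : Int) + 1 + (c : Int)).toNat = i + c + 1 := by omega
    rw [h1, h2, show PySem.Int.mod (((c + 1 : Nat)) : Int) 2 = ((((c + 1) % 2 : Nat)) : Int) from by
      exact_mod_cast PySem.Int.mod_natCast (c + 1) 2]
    by_cases hp : (c + 1) % 2 = 0
    · rw [if_pos (show ((((c + 1) % 2 : Nat)) : Int) = 0 from by simp [hp])]
      simp [hp, pvSE, pvSO, pvTerm, Prod.ext_iff]
      ring
    · rw [if_neg (show ¬ ((((c + 1) % 2 : Nat)) : Int) = 0 from
        fun h => hp (by exact_mod_cast h))]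
      simp [hp, pvSE, pvSO, pvTerm, Prod.ext_iff]
      ring

-- B's inner loop: running XOR + alternating sign accumulates pvSE - pvSO
lemma pvB_inner (Arr : List Int) (i : Nat) :
    ∀ (c : Nat) (d : Int),
      (PySem.List.pyRange (i : Int) ((i : Int) + (c : Int))).foldl
        (fun (s : Int × Int × Int) j =>
          let cur := PySem.Int.bxor s.2.1 (PySem.List.pyGetD Arr j 0)
          (s.1 + s.2.2 * cur, cur, -s.2.2))
        (d, 0, -1)
      = (d + pvSE Arr i c - pvSO Arr i c, pvTerm Arr i (i + c),
          if c % 2 = 0 then -1 else 1) := by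
  intro c
  induction c with
  | zero =>
    intro d
    simp [pvSE, pvSO, pvTerm, PySem.Int.bxor_self]
  | succ c ih =>
    intro d
    have hsplit : PySem.List.pyRange (i : Int) ((i : Int) + ((c + 1 : Nat) : Int))
        = PySem.List.pyRange (i : Int) ((i : Int) + (c : Int)) ++ [(i : Int) + (c : Int)] := by
      have : ((i : Int) + ((c + 1 : Nat) : Int)) = ((i : Int) + (c : Int)) + 1 := by push_cast; ring
      rw [this, PySem.List.pyRange_one_succ_right (by omega)]
    rw [hsplit, List.foldl_append, ih]
    simp only [List.foldl_cons, List.foldl_nil]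
    have h1 : ((i : Int) + (c : Int)) = (((i + c : Nat)) : Int) := by push_cast; ring
    rw [h1, PySem.List.pyGetD_natCast]
    have hcur : PySem.Int.bxor (pvTerm Arr i (i + c)) (Arr.getD (i + c) 0)
        = pvTerm Arr i (i + c + 1) := by
      unfold pvTerm
      rw [pv_bxor_right_swap]
      rfl
    rw [hcur]
    by_cases hp : c % 2 = 0
    · have hp1 : ¬ ((c + 1) % 2 = 0) := by omega
      simp [hp, hp1, pvSE, pvSO, Prod.ext_iff]
      exact ⟨by ring, rfl⟩
    · have hp1 : (c + 1) % 2 = 0 := by omega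
      simp [hp, hp1, pvSE, pvSO, Prod.ext_iff]
      exact ⟨by ring, rfl⟩

-- ===== VERDICT (by name: the statement is the Claim_ definition above) =====
theorem calculateGoldenValue_spec : Claim_equal_calculateGoldenValue := by
  intro N Arr _hDom _hPre
  unfold Spec_calculateGoldenValue
  by_cases hN : N ≤ 0
  · simp [calculateGoldenValue, calculateGoldenValue_alt, PySem.List.pyRange_one_eq_nil hN]
  · obtain ⟨n, rfl⟩ : ∃ n : Nat, N = (n : Int) := ⟨N.toNat, by omega⟩
    obtain ⟨hxlen, hxval⟩ := pvXc_spec Arr n n le_rfl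
    simp only [calculateGoldenValue, calculateGoldenValue_alt]
    rw [PySem.List.foldl_congr_mem _ _
      (fun (p : Int × Int) i =>
        (p.1 + pvSE Arr i.toNat ((n : Int) - i).toNat, p.2 + pvSO Arr i.toNat ((n : Int) - i).toNat)) _
      (by
        intro p i hi
        rw [PySem.List.mem_pyRange_one] at hi
        obtain ⟨i', rfl⟩ : ∃ i' : Nat, i = (i' : Int) := ⟨i.toNat, by omega⟩
        have hilt : i' < n := by exact_mod_cast hi.2
        have hrange : ((n : Int) + 1) = ((i' : Int) + 1 + ((n - i' : Nat) : Int)) := by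
          omega
        rw [show PySem.List.pyRange ((i' : Int) + 1) ((n : Int) + 1)
            = PySem.List.pyRange ((i' : Int) + 1) ((i' : Int) + 1 + ((n - i' : Nat) : Int)) from by
          rw [← hrange]]
        rw [PySem.List.foldl_congr_mem _ _
          (fun (q : Int × Int) j =>
            if PySem.Int.mod (j - (i' : Int)) 2 = 0 then
              (q.1 + PySem.Int.bxor (pvPref Arr j.toNat) (pvPref Arr i'), q.2)
            else (q.1, q.2 + PySem.Int.bxor (pvPref Arr j.toNat) (pvPref Arr i'))) _
          (by
            intro q j hj
            rw [PySem.List.mem_pyRange_one] at hj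
            obtain ⟨j', rfl⟩ : ∃ j' : Nat, j = (j' : Int) := ⟨j.toNat, by omega⟩
            have hj'le : j' ≤ n := by
              have := hj.2
              push_cast at this
              omega
            simp only [PySem.List.pyGetD_natCast, Int.toNat_natCast]
            rw [hxval j' hj'le, hxval i' (by omega)])]
        rw [pvA_inner Arr i' (n - i')]
        have : (((n : Int)) - (i' : Int)).toNat = n - i' := by omega
        simp [this])]
    rw [PySem.List.foldl_congr_mem _ _
      (fun (d : Int) i =>
        d + (pvSE Arr i.toNat ((n : Int) - i).toNat - pvSO Arr i.toNat ((n : Int) - i).toNat)) _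
      (by
        intro d i hi
        rw [PySem.List.mem_pyRange_one] at hi
        obtain ⟨i', rfl⟩ : ∃ i' : Nat, i = (i' : Int) := ⟨i.toNat, by omega⟩
        have hilt : i' < n := by exact_mod_cast hi.2
        have hrange : ((n : Int)) = ((i' : Int) + ((n - i' : Nat) : Int)) := by omega
        rw [show PySem.List.pyRange ((i' : Int)) ((n : Int))
            = PySem.List.pyRange ((i' : Int)) ((i' : Int) + ((n - i' : Nat) : Int)) from by
          rw [← hrange]]
        rw [pvB_inner Arr i' (n - i')]
        have h1 : (((n : Int)) - (i' : Int)).toNat = n - i' := by omega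
        simp [h1]
        ring)]
    rw [PySem.List.foldl_prod_mk
      (f := fun (a : Int) (i : Int) => a + pvSE Arr i.toNat ((n : Int) - i).toNat)
      (g := fun (a : Int) (i : Int) => a + pvSO Arr i.toNat ((n : Int) - i).toNat)]
    rw [PySem.List.foldl_add, PySem.List.foldl_add, PySem.List.foldl_add, pv_sum_map_sub]
    ring_nf
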